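-- pv_equiv track=rewrite | github.com/vsbpdev/junior-ai | context_aware_matching.py | _extract_control_flow
-- ===== SOURCE A (Python) =====
-- from typing import Dict, List, Optional, Set, Tuple, Union, Any
--
-- def _extract_control_flow(text: str, position: int) -> List[str]:
--     """Extract control flow context"""
--     # Get lines before position
--     before_text = text[:position]
--     lines = before_text.split('\n')[-20:]  # Last 20 lines
--
--     control_flow = []
--     control_keywords = ['if', 'else', 'elif', 'for', 'while', 'try', 'except', 'finally', 'with', 'switch', 'case']
--
--     for line in lines:
--         stripped = line.strip()
--         for keyword in control_keywords:
--             if stripped.startswith(keyword + ' ') or stripped.startswith(keyword + ':'):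
--                 control_flow.append(keyword)
--
--     return control_flow
-- ===== SOURCE B (Python) =====
-- def _extract_control_flow(text, position):
--     """Extract control flow context"""
--     lines = text[:position].split('\n')[-20:]
--     keywords = {'if', 'else', 'elif', 'for', 'while', 'try',
--                 'except', 'finally', 'with', 'switch', 'case'}
--     result = []
--     for line in lines:
--         s = line.strip()
--         for i, ch in enumerate(s):
--             if ch == ' ' or ch == ':':
--                 tok = s[:i]
--                 if tok in keywords:
--                     result.append(tok)
--                 break
--     return result
-- ===== Notes on version B (the rewrite author's own statement) =====
-- stated objective: alternative
-- what changed: Instead of testing each stripped line against 11 keyword+' '/keyword+':' prefixes, B scans the line once for the first ' ' or ':' delimiter and checks the leading token against a keyword set.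
import Mathlib
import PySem

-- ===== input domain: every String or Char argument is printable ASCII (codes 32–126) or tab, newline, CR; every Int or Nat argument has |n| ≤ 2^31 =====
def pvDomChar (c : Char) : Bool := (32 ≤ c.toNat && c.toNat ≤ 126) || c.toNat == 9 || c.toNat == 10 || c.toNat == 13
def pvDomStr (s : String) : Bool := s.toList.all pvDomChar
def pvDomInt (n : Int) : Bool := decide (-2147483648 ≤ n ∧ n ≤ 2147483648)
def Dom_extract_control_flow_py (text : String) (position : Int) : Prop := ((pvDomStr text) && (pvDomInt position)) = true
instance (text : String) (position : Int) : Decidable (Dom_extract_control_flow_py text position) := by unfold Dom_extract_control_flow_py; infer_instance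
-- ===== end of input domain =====

-- B replaces A's 11 keyword-prefix tests per line by one left-to-right scan for the first ' '/':'
-- delimiter plus a set lookup of the leading token (alternative decomposition, same cost).


-- ===== PORT A =====
def ecfKeywords : List String :=
  ["if", "else", "elif", "for", "while", "try", "except", "finally", "with", "switch", "case"]

def extract_control_flow_py (text : String) (position : Int) : List String :=
  -- before_text = text[:position]; lines = before_text.split('\n')[-20:]
  let before : List Char := PySem.List.slice text.toList none (some position)
  let lines : List (List Char) := PySem.List.slice (PySem.Chars.splitOn before ['\n']) (some (-20)) none
  lines.foldl (fun acc line =>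
    let stripped := PySem.Chars.strip line
    ecfKeywords.foldl (fun acc2 kw =>
      if PySem.Chars.startswith stripped (kw.toList ++ [' ']) ||
         PySem.Chars.startswith stripped (kw.toList ++ [':']) then
        acc2 ++ [kw]
      else acc2) acc) []

-- ===== PORT B =====
def ecfKwSet : PySem.Set String :=
  PySem.Set.ofList ["if", "else", "elif", "for", "while", "try", "except", "finally", "with", "switch", "case"]

-- the 'for i, ch in enumerate(s): if ch == ' ' or ch == ':': … break' loop of Source B:
-- returns s[:i] for the first delimiter position i, none if the loop finishes without break
def ecfScan (s : List Char) : List Char → Nat → Option (List Char)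
  | [], _ => none
  | c :: rest, i =>
    if c = ' ' || c = ':' then some (PySem.List.slice s none (some (i : Int)))
    else ecfScan s rest (i + 1)

def extract_control_flow_py_alt (text : String) (position : Int) : List String :=
  let lines : List (List Char) :=
    PySem.List.slice (PySem.Chars.splitOn (PySem.List.slice text.toList none (some position)) ['\n']) (some (-20)) none
  lines.foldl (fun acc line =>
    let s := PySem.Chars.strip line
    match ecfScan s s 0 with
    | some tok => if String.ofList tok ∈ ecfKwSet then acc ++ [String.ofList tok] else acc
    | none => acc) []

-- ===== PRECONDITION & SPEC =====
def Spec_extract_control_flow_py (text : String) (position : Int) (out : List String) : Prop := out = extract_control_flow_py_alt text position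
instance (text : String) (position : Int) (out : List String) : Decidable (Spec_extract_control_flow_py text position out) := by unfold Spec_extract_control_flow_py; infer_instance

-- ===== CLAIM (what is proved, stated in full; the proofs are below) =====
def Claim_equal_extract_control_flow_py : Prop := ∀ (text : String) (position : Int), Dom_extract_control_flow_py text position → Spec_extract_control_flow_py text position (extract_control_flow_py text position)

-- ===== LEMMAS AND PROOFS =====

-- non-delimiter characters
def ecfND (c : Char) : Bool := !(c == ' ' || c == ':')

lemma ecfScan_go (suf pre : List Char) :
    ecfScan (pre ++ suf) suf pre.length =
      if suf.dropWhile ecfND = [] then none else some (pre ++ suf.takeWhile ecfND) := by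
  induction suf generalizing pre with
  | nil => simp [ecfScan]
  | cons c rest ih =>
    by_cases hc : (c = ' ' || c = ':') = true
    · have hnd : ecfND c = false := by
        simp only [ecfND]
        cases hc' : (c == ' ' || c == ':') <;> simp_all
      simp [ecfScan, hc, hnd, PySem.List.slice_to_natCast]
    · have hnd : ecfND c = true := by
        simp only [ecfND]
        cases hc' : (c == ' ' || c == ':') <;> simp_all
      have := ih (pre ++ [c])
      simp only [List.append_assoc, List.singleton_append, List.length_append,
        List.length_singleton] at this
      simp [ecfScan, hc, hnd, this]

lemma ecfScan_spec (s : List Char) :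
    ecfScan s s 0 =
      if s.dropWhile ecfND = [] then none else some (s.takeWhile ecfND) := by
  simpa using ecfScan_go s []

-- every character of every keyword is a non-delimiter, and the keyword list has no duplicates
lemma ecfKw_nd : ∀ kw ∈ ecfKeywords, kw.toList.all ecfND = true := by decide
lemma ecfKw_nodup : ecfKeywords.Nodup := by decide

-- A's per-keyword test holds exactly for the leading token of s (when a delimiter exists)
lemma ecfCond_iff (s t r : List Char) (d : Char) (kw : String)
    (hkw : kw.toList.all ecfND = true)
    (hs : s = t ++ d :: r) (ht : t.all ecfND = true) (hd : ecfND d = false) :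
    (PySem.Chars.startswith s (kw.toList ++ [' ']) ||
     PySem.Chars.startswith s (kw.toList ++ [':'])) = true ↔ kw.toList = t := by
  constructor
  · intro h
    have h' : ∃ d', ecfND d' = false ∧ (kw.toList ++ [d']) <+: s := by
      rcases Bool.or_eq_true_iff.mp h with h1 | h1
      · exact ⟨' ', by decide, (PySem.Chars.startswith_iff _ _).mp h1⟩
      · exact ⟨':', by decide, (PySem.Chars.startswith_iff _ _).mp h1⟩
    rcases h' with ⟨d', hd', hpre⟩
    set K := kw.toList with hK
    have hKnd : ∀ c ∈ K, ecfND c = true := by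
      intro c hc; exact List.all_eq_true.mp hkw c hc
    have htnd : ∀ c ∈ t, ecfND c = true := by
      intro c hc; exact List.all_eq_true.mp ht c hc
    have htake : K ++ [d'] = (t ++ d :: r).take (K.length + 1) := by
      have := List.prefix_iff_eq_take.mp hpre
      simpa [hs] using this
    rcases lt_trichotomy K.length t.length with hlt | heq | hgt
    · -- would put the delimiter d' inside t
      exfalso
      have : K ++ [d'] = t.take (K.length + 1) := by
        rw [htake, List.take_append_of_le_length (by omega)]
      have hd'mem : d' ∈ t := by
        have : d' ∈ t.take (K.length + 1) := by
          rw [← this]; simp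
        exact List.mem_of_mem_take this
      have := htnd d' hd'mem
      simp [this] at hd'
    · -- equal lengths: K = t
      have : K ++ [d'] = t ++ [d] := by
        rw [htake, heq]
        have : (t ++ d :: r).take (t.length + 1) = t ++ [d] := by
          rw [show d :: r = [d] ++ r by simp, ← List.append_assoc]
          rw [show t.length + 1 = (t ++ [d]).length by simp]
          exact List.take_left
        rw [this]
      exact (List.append_inj this (by omega)).1
    · -- would put the line's delimiter d inside the keyword
      exfalso
      have htd : t ++ [d] = (t ++ d :: r).take (t.length + 1) := by
        rw [show d :: r = [d] ++ r by simp, ← List.append_assoc]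
        rw [show t.length + 1 = (t ++ [d]).length by simp]
        exact List.take_left.symm
      have hsub : t ++ [d] = (K ++ [d']).take (t.length + 1) := by
        rw [htd, htake, List.take_take]
        congr 1
        omega
      have : t ++ [d] = K.take (t.length + 1) := by
        rw [hsub, List.take_append_of_le_length (by omega)]
      have hdK : d ∈ K := by
        have : d ∈ K.take (t.length + 1) := by rw [← this]; simp
        exact List.mem_of_mem_take this
      have := hKnd d hdK
      simp [this] at hd
  · intro h
    apply Bool.or_eq_true_iff.mpr
    have hd2 : (d == ' ' || d == ':') = true := by
      cases h' : (d == ' ' || d == ':') with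
      | true => rfl
      | false => simp [ecfND, h'] at hd
    have hds : d = ' ' ∨ d = ':' := by
      rcases Bool.or_eq_true_iff.mp hd2 with h' | h'
      · exact Or.inl (by simpa using h')
      · exact Or.inr (by simpa using h')
    rcases hds with rfl | rfl
    · exact Or.inl ((PySem.Chars.startswith_iff _ _).mpr ⟨r, by simp [hs, h]⟩)
    · exact Or.inr ((PySem.Chars.startswith_iff _ _).mpr ⟨r, by simp [hs, h]⟩)

-- the two per-line bodies agree, for any accumulator
lemma ecfLine_eq (s : List Char) (acc : List String) :
    ecfKeywords.foldl (fun acc2 kw =>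
      if PySem.Chars.startswith s (kw.toList ++ [' ']) ||
         PySem.Chars.startswith s (kw.toList ++ [':']) then
        acc2 ++ [kw]
      else acc2) acc =
    (match ecfScan s s 0 with
     | some tok => if String.ofList tok ∈ ecfKwSet then acc ++ [String.ofList tok] else acc
     | none => acc) := by
  have hfold := PySem.List.foldl_append_if
    (fun kw : String => PySem.Chars.startswith s (kw.toList ++ [' ']) ||
      PySem.Chars.startswith s (kw.toList ++ [':'])) id ecfKeywords acc
  simp only [id_eq, List.map_id] at hfold
  rw [hfold, ecfScan_spec]
  by_cases hdw : s.dropWhile ecfND = []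
  · -- no delimiter in s: no keyword matches either
    have hall : ∀ c ∈ s, ecfND c = true := List.dropWhile_eq_nil_iff.mp hdw
    have : ecfKeywords.filter (fun kw =>
        PySem.Chars.startswith s (kw.toList ++ [' ']) ||
        PySem.Chars.startswith s (kw.toList ++ [':'])) = [] := by
      apply List.filter_eq_nil_iff.mpr
      intro kw _ h
      have h' : ∃ d', ecfND d' = false ∧ (kw.toList ++ [d']) <+: s := by
        rcases Bool.or_eq_true_iff.mp h with h1 | h1
        · exact ⟨' ', by decide, (PySem.Chars.startswith_iff _ _).mp h1⟩
        · exact ⟨':', by decide, (PySem.Chars.startswith_iff _ _).mp h1⟩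
      rcases h' with ⟨d', hd', hpre⟩
      have : d' ∈ s := hpre.subset (by simp)
      have := hall d' this
      simp [this] at hd'
    simp [hdw, this]
  · -- a first delimiter exists; the leading token is s.takeWhile ecfND
    set t := s.takeWhile ecfND with htdef
    obtain ⟨d, r, hdr⟩ : ∃ d r, s.dropWhile ecfND = d :: r := by
      cases h : s.dropWhile ecfND with
      | nil => exact absurd h hdw
      | cons d r => exact ⟨d, r, rfl⟩
    have hs : s = t ++ d :: r := by rw [htdef, ← hdr, List.takeWhile_append_dropWhile]
    have ht : t.all ecfND = true := by
      apply List.all_eq_true.mpr; intro c hc; exact List.mem_takeWhile_imp hc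
    have hd : ecfND d = false := by
      have := List.head_dropWhile_not ecfND (l := s) (by simp [hdr])
      simpa [hdr] using this
    have hfilter : ecfKeywords.filter (fun kw =>
        PySem.Chars.startswith s (kw.toList ++ [' ']) ||
        PySem.Chars.startswith s (kw.toList ++ [':'])) =
        ecfKeywords.filter (fun kw => kw == String.ofList t) := by
      apply List.filter_congr
      intro kw hkw
      have h1 := ecfCond_iff s t r d kw (ecfKw_nd kw hkw) hs ht hd
      by_cases h2 : kw.toList = t
      · have hb : (kw == String.ofList t) = true := by
          have : kw = String.ofList t := by
            apply String.toList_injective; rw [String.toList_ofList]; exact h2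
          simp [this]
        rw [h1.mpr h2, hb]
      · have : kw ≠ String.ofList t := by
          intro h; apply h2; rw [h, String.toList_ofList]
        cases h3 : (PySem.Chars.startswith s (kw.toList ++ [' ']) ||
            PySem.Chars.startswith s (kw.toList ++ [':'])) with
        | true => exact absurd (h1.mp h3) h2
        | false => simp [this]
    by_cases hmem : String.ofList t ∈ ecfKeywords
    · have : ecfKeywords.filter (fun kw => kw == String.ofList t) = [String.ofList t] := by
        rw [List.filter_beq, List.count_eq_one_of_mem ecfKw_nodup hmem]
        simp
      simp only [hdw, hfilter, this]
      have hset : String.ofList t ∈ ecfKwSet := by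
        rw [ecfKwSet, PySem.Set.mem_ofList]; exact hmem
      simp [hset]
    · have : ecfKeywords.filter (fun kw => kw == String.ofList t) = [] := by
        rw [List.filter_beq, List.count_eq_zero_of_not_mem hmem]
        simp
      simp only [hdw, hfilter, this]
      have hset : String.ofList t ∉ ecfKwSet := by
        rw [ecfKwSet, PySem.Set.mem_ofList]; exact hmem
      simp [hset]

lemma ecfFold_eq (lines : List (List Char)) (acc : List String) :
    lines.foldl (fun acc line =>
      let stripped := PySem.Chars.strip line
      ecfKeywords.foldl (fun acc2 kw =>
        if PySem.Chars.startswith stripped (kw.toList ++ [' ']) ||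
           PySem.Chars.startswith stripped (kw.toList ++ [':']) then
          acc2 ++ [kw]
        else acc2) acc) acc =
    lines.foldl (fun acc line =>
      let s := PySem.Chars.strip line
      match ecfScan s s 0 with
      | some tok => if String.ofList tok ∈ ecfKwSet then acc ++ [String.ofList tok] else acc
      | none => acc) acc := by
  induction lines generalizing acc with
  | nil => rfl
  | cons l ls ih =>
    simp only [List.foldl_cons]
    rw [ecfLine_eq]
    exact ih _

-- ===== VERDICT (by name: the statement is the Claim_ definition above) =====
theorem extract_control_flow_py_spec : Claim_equal_extract_control_flow_py := by
  intro text position _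
  unfold Spec_extract_control_flow_py extract_control_flow_py extract_control_flow_py_alt
  exact ecfFold_eq _ []
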